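-- pv_equiv track=rewrite | github.com/sojoudian/COMP2152_Labs | Week04/lab04_solutions.py | shuffle_array_v2
-- ===== SOURCE A (Python) =====
-- def shuffle_array_v2(nums, n):
--     """Alternative: Use zip to pair elements."""
--     first_half = nums[:n]
--     second_half = nums[n:]
--     result = []
--
--     # zip pairs up elements from both halves
--     for x, y in zip(first_half, second_half):
--         result.append(x)
--         result.append(y)
--
--     return result
-- ===== SOURCE B (Python) =====
-- def shuffle_array_v2(nums, n):
--     """Alternative: preallocate and fill even/odd positions with strided slice assignment."""
--     first_half = nums[:n]
--     second_half = nums[n:]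
--     m = min(len(first_half), len(second_half))
--     result = [None] * (2 * m)
--     result[0::2] = first_half[:m]
--     result[1::2] = second_half[:m]
--     return result
-- ===== Notes on version B (the rewrite author's own statement) =====
-- stated objective: alternative
-- what changed: Replaces the append-in-loop over zip with preallocating a 2*m result and writing the two halves into it via strided slice assignments result[0::2] / result[1::2].
import Mathlib
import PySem

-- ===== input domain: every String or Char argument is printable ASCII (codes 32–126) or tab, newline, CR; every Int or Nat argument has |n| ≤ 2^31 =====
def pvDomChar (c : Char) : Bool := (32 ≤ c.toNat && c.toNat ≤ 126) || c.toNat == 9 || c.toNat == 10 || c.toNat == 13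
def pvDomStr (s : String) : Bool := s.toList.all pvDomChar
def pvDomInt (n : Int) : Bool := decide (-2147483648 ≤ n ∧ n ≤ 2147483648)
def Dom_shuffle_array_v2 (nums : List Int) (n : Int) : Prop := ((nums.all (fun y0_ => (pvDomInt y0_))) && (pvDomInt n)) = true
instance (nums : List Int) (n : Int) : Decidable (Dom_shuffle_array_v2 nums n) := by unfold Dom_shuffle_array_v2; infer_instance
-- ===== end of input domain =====

-- B replaces the append-in-loop over zip with preallocation and strided even/odd writes (alternative decomposition, same cost).

-- ===== PORT A =====
def shuffle_array_v2 (nums : List Int) (n : Int) : List Int :=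
  let first_half := PySem.List.slice nums none (some n)
  let second_half := PySem.List.slice nums (some n) none
  (first_half.zip second_half).foldl (fun result p => result ++ [p.1, p.2]) []

-- ===== PORT B =====
-- result[0::2] = first[:m]; result[1::2] = second[:m] is ported by hand (PySem has no strided
-- slice assignment) as position i of the 2*m result holding first[i/2] at even i and second[i/2] at odd i — exact.
def shuffle_array_v2_alt (nums : List Int) (n : Int) : List Int :=
  let first_half := PySem.List.slice nums none (some n)
  let second_half := PySem.List.slice nums (some n) none
  let m := min first_half.length second_half.length
  (List.range (2 * m)).map (fun i =>
    if i % 2 == 0 then first_half.getD (i / 2) 0 else second_half.getD (i / 2) 0)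

-- ===== PRECONDITION & SPEC =====
def Spec_shuffle_array_v2 (nums : List Int) (n : Int) (out : List Int) : Prop := out = shuffle_array_v2_alt nums n
instance (nums : List Int) (n : Int) (out : List Int) : Decidable (Spec_shuffle_array_v2 nums n out) := by unfold Spec_shuffle_array_v2; infer_instance

-- ===== CLAIM (what is proved, stated in full; the proofs are below) =====
def Claim_equal_shuffle_array_v2 : Prop := ∀ (nums : List Int) (n : Int), Dom_shuffle_array_v2 nums n → Spec_shuffle_array_v2 nums n (shuffle_array_v2 nums n)

-- ===== LEMMAS AND PROOFS =====

-- ===== VERDICT (by name: the statement is the Claim_ definition above) =====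
lemma range_two_succ (m : Nat) :
    List.range (2 * m + 2) = 0 :: 1 :: (List.range (2 * m)).map (fun k => k + 2) := by
  simp only [List.range_succ_eq_map, List.map_cons, List.map_map]
  rfl

lemma interleave_eq : ∀ (a b : List Int),
    (a.zip b).foldl (fun r p => r ++ [p.1, p.2]) [] =
      (List.range (2 * min a.length b.length)).map (fun i =>
        if i % 2 == 0 then a.getD (i / 2) 0 else b.getD (i / 2) 0) := by
  intro a b
  rw [PySem.List.foldl_append_eq_flatMap (g := fun p : Int × Int => [p.1, p.2])]
  simp only [List.nil_append]
  induction a generalizing b with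
  | nil => simp
  | cons x a' ih =>
    cases b with
    | nil => simp
    | cons y b' =>
      have hmin : min (x :: a').length (y :: b').length = min a'.length b'.length + 1 := by
        simp only [List.length_cons]; omega
      rw [hmin, Nat.mul_add, range_two_succ]
      simp only [List.zip_cons_cons, List.flatMap_cons, List.map_cons, List.map_map]
      norm_num [List.getD]
      rw [ih b']
      apply List.map_congr_left
      intro k _
      have h2 : (k + 2) % 2 = k % 2 := by omega
      have h3 : (k + 2) / 2 = k / 2 + 1 := by omega
      simp [Function.comp, h2, h3]

theorem shuffle_array_v2_spec : Claim_equal_shuffle_array_v2 := by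
  intro nums n _
  unfold Spec_shuffle_array_v2 shuffle_array_v2 shuffle_array_v2_alt
  exact interleave_eq _ _
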